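-- pv_equiv track=rewrite | github.com/tycyd/codeforces | implementation/1360G AB Matrix.py | ab_matrix
-- ===== SOURCE A (Python) =====
-- def ab_matrix(n, m, a, b):
--
--     if a*n != b*m:
--         return None
--
--     res = [[0 for j in range(m)] for i in range(n)]
--
--     cur = 0
--     for i in range(n):
--         for j in range(a):
--             res[i][cur] = 1
--             cur = (cur + 1) % m
--
--     return res
-- ===== SOURCE B (Python) =====
-- def ab_matrix(n, m, a, b):
--     if a * n != b * m:
--         return None
--     # row i starts filling at column (i*a) % m, so cell (i, j) is 1
--     # exactly when (j - i*a) % m < a; each cell is computed independently.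
--     return [[1 if (j - i * a) % m < a else 0 for j in range(m)] for i in range(n)]
-- ===== Notes on version B (the rewrite author's own statement) =====
-- stated objective: simpler
-- what changed: Replaces the mutable zero matrix plus the running wrap-around counter `cur` with a single nested comprehension computing each cell independently from the closed form (j - i*a) % m < a.
import Mathlib
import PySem

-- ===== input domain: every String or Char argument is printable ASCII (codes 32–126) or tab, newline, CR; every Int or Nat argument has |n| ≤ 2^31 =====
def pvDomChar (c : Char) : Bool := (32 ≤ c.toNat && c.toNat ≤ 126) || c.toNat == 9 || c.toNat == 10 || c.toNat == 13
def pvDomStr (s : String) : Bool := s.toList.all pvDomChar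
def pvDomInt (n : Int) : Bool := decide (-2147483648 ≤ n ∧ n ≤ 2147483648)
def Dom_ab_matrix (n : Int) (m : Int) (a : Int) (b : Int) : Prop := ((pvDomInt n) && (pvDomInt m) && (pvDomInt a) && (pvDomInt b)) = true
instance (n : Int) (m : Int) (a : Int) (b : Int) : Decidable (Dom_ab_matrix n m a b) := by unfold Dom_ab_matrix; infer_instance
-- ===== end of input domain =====

-- B replaces A's mutable matrix and running wrap-around counter by a nested
-- comprehension computing each cell from the closed form (j - i*a) % m < a (objective: simpler).


-- ===== PORT A =====
-- one iteration of A's inner loop body: `res[i][cur] = 1; cur = (cur + 1) % m`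
-- (none = the Python statement raises: IndexError on res[i][cur], ZeroDivisionError on % 0)
def abSet (st : Option (List (List Int) × Int)) (i m : Int) : Option (List (List Int) × Int) :=
  match st with
  | none => none
  | some (res, cur) =>
    match PySem.List.pyGet? res i with
    | none => none
    | some row =>
      match PySem.List.pySet? row cur 1 with
      | none => none
      | some row' =>
        match PySem.Int.mod? (cur + 1) m with
        | none => none
        | some c => some (PySem.List.pySetD res i row', c)

def ab_matrix (n : Int) (m : Int) (a : Int) (b : Int) : Option (List (List Int)) :=
  if a * n ≠ b * m then none
  else
    let res0 := (PySem.List.pyRange 0 n).map (fun _ => (PySem.List.pyRange 0 m).map (fun _ => (0 : Int)))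
    match (PySem.List.pyRange 0 n).foldl
        (fun st i => (PySem.List.pyRange 0 a).foldl (fun st _ => abSet st i m) st)
        (some (res0, 0)) with
    | none => none
    | some (res, _) => some res

-- ===== PORT B =====
def ab_matrix_alt (n : Int) (m : Int) (a : Int) (b : Int) : Option (List (List Int)) :=
  if a * n ≠ b * m then none
  else some ((PySem.List.pyRange 0 n).map (fun i =>
    (PySem.List.pyRange 0 m).map (fun j =>
      if PySem.Int.mod (j - i * a) m < a then (1 : Int) else 0)))

-- ===== PRECONDITION & SPEC =====
-- Pre_ excludes exactly the inputs where A raises IndexError: the guard passes, n > 0,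
-- a > 0 and m < 0, so A assigns into an empty row.
def Pre_ab_matrix (n : Int) (m : Int) (a : Int) (b : Int) : Prop :=
  ¬ (a * n = b * m ∧ 0 < n ∧ 0 < a ∧ m < 0)
instance (n : Int) (m : Int) (a : Int) (b : Int) : Decidable (Pre_ab_matrix n m a b) := by unfold Pre_ab_matrix; infer_instance
def pvWitness_ab_matrix : Int × Int × Int × Int := (2, 2, 1, 1)

def Spec_ab_matrix (n : Int) (m : Int) (a : Int) (b : Int) (out : Option (List (List Int))) : Prop := out = ab_matrix_alt n m a b
instance (n : Int) (m : Int) (a : Int) (b : Int) (out : Option (List (List Int))) : Decidable (Spec_ab_matrix n m a b out) := by unfold Spec_ab_matrix; infer_instance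

-- ===== CLAIM (what is proved, stated in full; the proofs are below) =====
def Claim_equal_ab_matrix : Prop := ∀ (n : Int) (m : Int) (a : Int) (b : Int), Dom_ab_matrix n m a b → Pre_ab_matrix n m a b → Spec_ab_matrix n m a b (ab_matrix n m a b)

-- ===== LEMMAS AND PROOFS =====

lemma len_pyRange_toNat (m : Int) (hm : 0 ≤ m) : (PySem.List.pyRange 0 m).length = m.toNat := by
  have h : m = (m.toNat : Int) := (Int.toNat_of_nonneg hm).symm
  rw [h, PySem.List.pyRange_zero_natCast]; simp; omega

lemma getElem_map_pyRange {α : Type} (m : Int) (hm : 0 ≤ m) (f : Int → α) (j : Nat)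
    (hj : j < ((PySem.List.pyRange 0 m).map f).length) :
    ((PySem.List.pyRange 0 m).map f)[j] = f (j : Int) := by
  have hjm : j < m.toNat := by rw [List.length_map, len_pyRange_toNat m hm] at hj; exact hj
  have h1 : ((PySem.List.pyRange 0 m).map f)[j]? = some (f (j : Int)) := by
    rw [show PySem.List.pyRange 0 m = PySem.List.pyRange 0 ((m.toNat : Int)) by
      rw [Int.toNat_of_nonneg hm]]
    exact PySem.List.getElem?_map_pyRange_zero f m.toNat j hjm
  rw [List.getElem?_eq_getElem hj] at h1
  exact Option.some.inj h1

lemma emod_le_self_of_nonneg (t m : Int) (ht : 0 ≤ t) (hm : 0 < m) : t % m ≤ t := by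
  by_cases h : t < m
  · rw [Int.emod_eq_of_lt ht h]
  · have := Int.emod_lt_of_pos t hm
    omega

lemma inner_fill (m : Int) (hm : 0 < m) (i t : Nat) (res : List (List Int)) (cur : Int)
    (hi : i < res.length) (hrow : res[i].length = m.toNat) (hc0 : 0 ≤ cur) (hcm : cur < m) :
    (PySem.List.pyRange 0 (t : Int)).foldl (fun st _ => abSet st (i : Int) m) (some (res, cur))
    = some (res.set i ((PySem.List.pyRange 0 m).map
        (fun j => if (j - cur) % m < (t : Int) then (1 : Int) else PySem.List.pyGetD res[i] j 0)),
        (cur + t) % m) := by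
  induction t with
  | zero =>
    have hmap : (PySem.List.pyRange 0 m).map
        (fun j => if (j - cur) % m < ((0 : Nat) : Int) then (1 : Int) else PySem.List.pyGetD res[i] j 0)
        = (PySem.List.pyRange 0 m).map (fun j => PySem.List.pyGetD res[i] j 0) := by
      refine List.map_congr_left (fun j _ => ?_)
      rw [if_neg]
      have := Int.emod_nonneg (j - cur) (ne_of_gt hm)
      push_cast
      omega
    rw [hmap]
    have hres : (PySem.List.pyRange 0 m).map (fun j => PySem.List.pyGetD res[i] j 0) = res[i] := by
      have : m = ((res[i].length : Nat) : Int) := by rw [hrow]; omega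
      rw [this]
      exact PySem.List.map_pyGetD_pyRange_zero' res[i] 0
    rw [hres, List.set_getElem_self hi]
    norm_num
    rw [Int.emod_eq_of_lt hc0 hcm]
  | succ t ih =>
    have ht0 : (0 : Int) ≤ (t : Int) := by positivity
    rw [show (((t + 1 : Nat)) : Int) = (t : Int) + 1 by push_cast; ring,
      PySem.List.pyRange_one_succ_right ht0, List.foldl_append, ih, List.foldl_cons, List.foldl_nil]
    set c : Int := (cur + (t : Int)) % m with hc
    set rt : List Int := (PySem.List.pyRange 0 m).map
        (fun j => if (j - cur) % m < (t : Int) then (1 : Int) else PySem.List.pyGetD res[i] j 0) with hrt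
    have hc0' : 0 ≤ c := Int.emod_nonneg _ (ne_of_gt hm)
    have hcm' : c < m := Int.emod_lt_of_pos _ hm
    have hlrt : rt.length = m.toNat := by
      rw [hrt, List.length_map, len_pyRange_toNat m hm.le]
    have hstep1 : PySem.List.pyGet? (res.set i rt) (i : Int) = some rt := by
      rw [PySem.List.pyGet?_natCast]
      simp [hi]
    have hctn : c = ((c.toNat : Nat) : Int) := (Int.toNat_of_nonneg hc0').symm
    have hcnlt : c.toNat < rt.length := by rw [hlrt]; omega
    have hstep2 : PySem.List.pySet? rt c 1 = some (rt.set c.toNat 1) := by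
      rw [hctn]
      exact PySem.List.pySet?_natCast rt c.toNat 1 hcnlt
    have hstep3 : PySem.Int.mod? (c + 1) m = some ((c + 1) % m) := by
      rw [show PySem.Int.mod? (c+1) m = if m = 0 then none else some (PySem.Int.mod (c+1) m) from rfl]
      rw [if_neg (ne_of_gt hm), PySem.Int.mod_eq_emod_of_pos hm]
    show abSet (some (res.set i rt, c)) (i : Int) m = _
    rw [abSet, hstep1]
    simp only []
    rw [hstep2, hstep3]
    simp only []
    rw [PySem.List.pySetD_natCast, List.set_set]
    have hcur : (c + 1) % m = (cur + ((t : Int) + 1)) % m := by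
      rw [hc, Int.emod_add_emod]
      ring_nf
    have hrow' : rt.set c.toNat 1 = (PySem.List.pyRange 0 m).map
        (fun j => if (j - cur) % m < (t : Int) + 1 then (1 : Int) else PySem.List.pyGetD res[i] j 0) := by
      apply List.ext_getElem
      · rw [List.length_set, hlrt, List.length_map, len_pyRange_toNat m hm.le]
      · intro p hp1 hp2
        have hpm : p < m.toNat := by rw [List.length_set, hlrt] at hp1; exact hp1
        rw [List.getElem_set, getElem_map_pyRange m hm.le _ p hp2,
          getElem_map_pyRange m hm.le _ p (by rw [List.length_map, len_pyRange_toNat m hm.le]; exact hpm)]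
        have hx0 : 0 ≤ ((p : Int) - cur) % m := Int.emod_nonneg _ (ne_of_gt hm)
        have hxm : ((p : Int) - cur) % m < m := Int.emod_lt_of_pos _ hm
        have hA : (c - cur) % m = (t : Int) % m := by
          rw [hc, Int.sub_emod, Int.emod_emod_of_dvd _ dvd_rfl, ← Int.sub_emod]
          ring_nf
        have htm : (t : Int) % m ≤ (t : Int) := emod_le_self_of_nonneg _ _ ht0 hm
        by_cases hcp : c.toNat = p
        · -- written position: condition (p - cur) % m < t + 1 holds
          have hpc : (p : Int) = c := by rw [← hcp]; omega
          rw [if_pos hcp, if_pos]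
          rw [hpc, hA]
          omega
        · rw [if_neg hcp]
          by_cases hlt : ((p : Int) - cur) % m < (t : Int)
          · rw [if_pos hlt, if_pos (by omega)]
          · rw [if_neg hlt, if_neg]
            intro habs
            have hxt : ((p : Int) - cur) % m = (t : Int) := by omega
            have htm' : (t : Int) < m := by omega
            have : c = (p : Int) := by
              rw [hc, ← hxt, Int.add_comm cur, Int.emod_add_emod]
              have : (p : Int) - cur + cur = (p : Int) := by ring
              rw [this, Int.emod_eq_of_lt (by positivity) (by exact_mod_cast (by omega : (p:Int) < m))]
            omega
    rw [hrow', hcur]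

def zRow (m : Int) : List Int := (PySem.List.pyRange 0 m).map (fun _ => (0 : Int))
def bRow (m a i : Int) : List Int :=
  (PySem.List.pyRange 0 m).map (fun j => if PySem.Int.mod (j - i * a) m < a then (1 : Int) else 0)

lemma zRow_getD (m j : Int) : PySem.List.pyGetD (zRow m) j 0 = 0 := by
  unfold PySem.List.pyGetD
  cases h : PySem.List.pyGet? (zRow m) j with
  | none => rfl
  | some x =>
    have hx := PySem.List.mem_of_pyGet?_eq_some _ h
    unfold zRow at hx
    rw [List.mem_map] at hx
    obtain ⟨y, -, rfl⟩ := hx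
    rfl

lemma sub_emod_emod (j x m : Int) : (j - x % m) % m = (j - x) % m := by
  rw [Int.sub_emod j (x % m) m, Int.emod_emod_of_dvd _ dvd_rfl, ← Int.sub_emod]

lemma outer_fill (n m a : Int) (hm : 0 < m) (ha : 0 < a) (hn : 0 ≤ n) (k : Nat) (hk : (k : Int) ≤ n) :
    (PySem.List.pyRange 0 (k : Int)).foldl
        (fun st i => (PySem.List.pyRange 0 a).foldl (fun st _ => abSet st i m) st)
        (some ((PySem.List.pyRange 0 n).map (fun _ => zRow m), 0))
    = some ((PySem.List.pyRange 0 n).map (fun i => if i < (k : Int) then bRow m a i else zRow m),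
        ((k : Int) * a) % m) := by
  induction k with
  | zero =>
    have hmap : (PySem.List.pyRange 0 n).map (fun i => if i < ((0 : Nat) : Int) then bRow m a i else zRow m)
        = (PySem.List.pyRange 0 n).map (fun _ => zRow m) := by
      refine List.map_congr_left (fun i hi => ?_)
      rw [PySem.List.mem_pyRange_one] at hi
      rw [if_neg (by push_cast; omega)]
    rw [hmap]
    norm_num
  | succ k ih =>
    have hk' : (k : Int) ≤ n := by push_cast at hk ⊢; omega
    have haa : ((a.toNat : Nat) : Int) = a := Int.toNat_of_nonneg ha.le
    rw [show (((k + 1 : Nat)) : Int) = (k : Int) + 1 by push_cast; ring,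
      PySem.List.pyRange_one_succ_right (by positivity), List.foldl_append, ih hk',
      List.foldl_cons, List.foldl_nil]
    set matk := (PySem.List.pyRange 0 n).map (fun i => if i < (k : Int) then bRow m a i else zRow m) with hmatk
    have hlm : matk.length = n.toNat := by rw [hmatk, List.length_map, len_pyRange_toNat n hn]
    have hkN : k < matk.length := by rw [hlm]; omega
    have hmk : matk[k] = zRow m := by
      show (List.map (fun i => if i < (k : Int) then bRow m a i else zRow m)
        (PySem.List.pyRange 0 n))[k] = zRow m
      rw [getElem_map_pyRange n hn _ k (by rwa [hmatk] at hkN)]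
      rw [if_neg (by omega)]
    have hrowlen : matk[k].length = m.toNat := by
      rw [hmk, zRow, List.length_map, len_pyRange_toNat m hm.le]
    have hc0 : 0 ≤ ((k : Int) * a) % m := Int.emod_nonneg _ (ne_of_gt hm)
    have hcm : ((k : Int) * a) % m < m := Int.emod_lt_of_pos _ hm
    have hin := inner_fill m hm k a.toNat matk (((k : Int) * a) % m) hkN hrowlen hc0 hcm
    rw [haa] at hin
    rw [hin]
    have hR : (PySem.List.pyRange 0 m).map
        (fun j => if (j - ((k : Int) * a) % m) % m < a then (1 : Int) else PySem.List.pyGetD matk[k] j 0)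
        = bRow m a (k : Int) := by
      rw [hmk]
      refine List.map_congr_left (fun j _ => ?_)
      rw [zRow_getD, PySem.Int.mod_eq_emod_of_pos hm, sub_emod_emod]
    rw [hR]
    have hcur : (((k : Int) * a) % m + a) % m = (((k : Int) + 1) * a) % m := by
      rw [Int.emod_add_emod]
      ring_nf
    rw [hcur]
    have hmat : matk.set k (bRow m a (k : Int))
        = (PySem.List.pyRange 0 n).map (fun i => if i < (k : Int) + 1 then bRow m a i else zRow m) := by
      apply List.ext_getElem
      · rw [List.length_set, hlm, List.length_map, len_pyRange_toNat n hn]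
      · intro p hp1 hp2
        rw [List.getElem_set, getElem_map_pyRange n hn _ p hp2]
        by_cases hkp : k = p
        · rw [if_pos hkp, hkp, if_pos (by omega)]
        · rw [if_neg hkp]
          have hp' : p < ((PySem.List.pyRange 0 n).map
              (fun i => if i < (k : Int) then bRow m a i else zRow m)).length := by
            rw [List.length_set] at hp1; rwa [hmatk] at hp1
          show ((PySem.List.pyRange 0 n).map
            (fun i => if i < (k : Int) then bRow m a i else zRow m))[p] = _
          rw [getElem_map_pyRange n hn _ p hp']
          split_ifs <;> first | rfl | omega
    rw [hmat]

-- ===== VERDICT (by name: the statement is the Claim_ definition above) =====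
theorem ab_matrix_spec : Claim_equal_ab_matrix := by
  intro n m a b hdom hpre
  unfold Spec_ab_matrix ab_matrix ab_matrix_alt
  by_cases hg : a * n = b * m
  · rw [if_neg (fun h => h hg), if_neg (fun h => h hg)]
    simp only []
    by_cases hn : n ≤ 0
    · have hnil : PySem.List.pyRange 0 n = [] := by simp [pysem, hn]
      simp [hnil]
    · push Not at hn
      by_cases hA : a ≤ 0
      · have hanil : PySem.List.pyRange 0 a = [] := by simp [pysem, hA]
        rw [hanil]
        simp only [List.foldl_nil]
        rw [PySem.List.foldl_ignore]
        refine congrArg some ?_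
        refine List.map_congr_left (fun i _ => ?_)
        by_cases hm : 0 < m
        · refine List.map_congr_left (fun j _ => ?_)
          rw [if_neg]
          have := PySem.Int.mod_nonneg (j - i * a) hm
          omega
        · have hmnil : PySem.List.pyRange 0 m = [] := by
            simp [pysem, (by omega : m ≤ 0)]
          rw [hmnil]
          rfl
      · push Not at hA
        have hm : 0 < m := by
          rcases lt_trichotomy m 0 with h | h | h
          · exact absurd ⟨hg, hn, hA, h⟩ hpre
          · exfalso
            rw [h, mul_zero] at hg
            have := mul_pos hA hn
            omega
          · exact h
        have hNn : ((n.toNat : Nat) : Int) = n := Int.toNat_of_nonneg hn.le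
        have hout := outer_fill n m a hm hA hn.le n.toNat (by omega)
        rw [hNn] at hout
        simp only [zRow, bRow] at hout
        rw [hout]
        refine congrArg some ?_
        refine List.map_congr_left (fun i hi => ?_)
        rw [PySem.List.mem_pyRange_one] at hi
        rw [if_pos hi.2]
  · rw [if_pos hg, if_pos hg]
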